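-- pv_equiv track=rewrite | github.com/NeilR2s/agos | backend/app/services/agent/skills.py | resolve_skill_prompts
-- ===== SOURCE A (Python) =====
-- SKILL_LIBRARY: dict[str, str] = {
--     "research-rigor": (
--         "Prioritize source quality, timeline accuracy, and explicit evidence separation. "
--         "When data conflicts, identify the conflict instead of smoothing it over."
--     ),
--     "portfolio-context": (
--         "Anchor recommendations to the operator's actual exposure when portfolio data is available. "
--         "Call out concentration, sizing, and overlap risks."
--     ),
--     "trade-guardrails": (
--         "Treat trade decisions as gated outputs. Distinguish setup quality, invalidation, and execution risk. "
--         "If the engine disagrees, surface that conflict clearly."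
--     ),
--     "web-investigator": (
--         "Use web and URL context selectively to fill factual gaps, then summarize findings in plain language. "
--         "Do not overstate freshness when only historical context is available."
--     ),
--     "quant-scratchpad": (
--         "Use code execution only when it materially improves precision or auditability. "
--         "Explain the result in operator-facing language after computation."
--     ),
-- }
--
-- def resolve_skill_prompts(skill_ids: list[str]) -> list[str]:
--     prompts: list[str] = []
--     seen: set[str] = set()
--     for skill_id in skill_ids:
--         normalized = skill_id.strip().lower()
--         if not normalized or normalized in seen:
--             continue
--         if normalized in SKILL_LIBRARY:
--             prompts.append(SKILL_LIBRARY[normalized])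
--             seen.add(normalized)
--     return prompts
-- ===== SOURCE B (Python) =====
-- SKILL_LIBRARY: dict[str, str] = {
--     "research-rigor": (
--         "Prioritize source quality, timeline accuracy, and explicit evidence separation. "
--         "When data conflicts, identify the conflict instead of smoothing it over."
--     ),
--     "portfolio-context": (
--         "Anchor recommendations to the operator's actual exposure when portfolio data is available. "
--         "Call out concentration, sizing, and overlap risks."
--     ),
--     "trade-guardrails": (
--         "Treat trade decisions as gated outputs. Distinguish setup quality, invalidation, and execution risk. "
--         "If the engine disagrees, surface that conflict clearly."
--     ),
--     "web-investigator": (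
--         "Use web and URL context selectively to fill factual gaps, then summarize findings in plain language. "
--         "Do not overstate freshness when only historical context is available."
--     ),
--     "quant-scratchpad": (
--         "Use code execution only when it materially improves precision or auditability. "
--         "Explain the result in operator-facing language after computation."
--     ),
-- }
--
-- def resolve_skill_prompts(skill_ids: list[str]) -> list[str]:
--     # library-driven: for each library key, find its first occurrence in the
--     # normalized input; order the present keys by that index, then look up.
--     norm = [s.strip().lower() for s in skill_ids]
--     firsts = sorted(((norm.index(k), k) for k in SKILL_LIBRARY if k in norm),
--                     key=lambda p: p[0])
--     return [SKILL_LIBRARY[k] for _, k in firsts]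
-- ===== Notes on version B (the rewrite author's own statement) =====
-- stated objective: alternative
-- what changed: Inverts the traversal: instead of a single input pass with a seen-set, B scans the five library keys, computes each present key's first-occurrence index in the normalized input, sorts the present keys by that index, and maps them to prompts; dedup disappears because library keys are distinct.
import Mathlib
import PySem

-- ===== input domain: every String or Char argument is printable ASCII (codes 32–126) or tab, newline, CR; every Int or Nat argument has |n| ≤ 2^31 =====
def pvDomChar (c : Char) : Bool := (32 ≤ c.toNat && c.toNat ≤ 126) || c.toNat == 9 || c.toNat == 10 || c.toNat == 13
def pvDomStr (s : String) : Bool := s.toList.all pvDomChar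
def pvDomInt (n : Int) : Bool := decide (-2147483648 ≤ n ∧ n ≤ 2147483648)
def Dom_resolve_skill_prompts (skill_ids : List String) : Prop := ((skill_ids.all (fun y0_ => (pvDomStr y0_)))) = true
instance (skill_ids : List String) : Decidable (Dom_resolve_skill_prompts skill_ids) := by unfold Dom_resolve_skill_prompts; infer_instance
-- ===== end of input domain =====

-- B inverts the traversal: it scans the library keys, finds each present key's first-occurrence
-- index in the normalized input, sorts the present keys by that index and maps them to prompts.

-- shared module-level constant SKILL_LIBRARY
def pvSkillLibrary : PySem.Dict String String := PySem.Dict.ofList [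
  ("research-rigor",
    "Prioritize source quality, timeline accuracy, and explicit evidence separation. When data conflicts, identify the conflict instead of smoothing it over."),
  ("portfolio-context",
    "Anchor recommendations to the operator's actual exposure when portfolio data is available. Call out concentration, sizing, and overlap risks."),
  ("trade-guardrails",
    "Treat trade decisions as gated outputs. Distinguish setup quality, invalidation, and execution risk. If the engine disagrees, surface that conflict clearly."),
  ("web-investigator",
    "Use web and URL context selectively to fill factual gaps, then summarize findings in plain language. Do not overstate freshness when only historical context is available."),
  ("quant-scratchpad",
    "Use code execution only when it materially improves precision or auditability. Explain the result in operator-facing language after computation.")]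

-- s.strip().lower(), used verbatim by both sources
def pvNorm (s : String) : String := PySem.Str.lower (PySem.Str.strip s)

-- ===== PORT A =====
-- A's loop body; SKILL_LIBRARY[normalized] is guarded by 'normalized in SKILL_LIBRARY', so getD's default is unreachable
def pvStepA (st : List String × PySem.Set String) (skill_id : String) : List String × PySem.Set String :=
  let normalized := pvNorm skill_id
  if normalized = "" ∨ normalized ∈ st.2 then st
  else if pvSkillLibrary.contains normalized then
    (st.1 ++ [pvSkillLibrary.getD normalized ""], PySem.Set.add st.2 normalized)
  else st

def resolve_skill_prompts (skill_ids : List String) : List String :=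
  (skill_ids.foldl pvStepA (([], PySem.Set.empty) : List String × PySem.Set String)).1

-- ===== PORT B =====
-- norm.index(k) is guarded by 'k in norm', so index?'s default is unreachable;
-- 'for k in SKILL_LIBRARY' iterates the dict's keys in insertion order.
def resolve_skill_prompts_alt (skill_ids : List String) : List String :=
  let norm := skill_ids.map pvNorm
  let firsts := PySem.List.sorted
    ((pvSkillLibrary.keys.filter (fun k => decide (k ∈ norm))).map
      (fun k => ((PySem.List.index? norm k).getD 0, k)))
    (fun p => p.1) false
  firsts.map (fun p => pvSkillLibrary.getD p.2 "")

-- ===== PRECONDITION & SPEC =====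
def Spec_resolve_skill_prompts (skill_ids : List String) (out : List String) : Prop := out = resolve_skill_prompts_alt skill_ids
instance (skill_ids : List String) (out : List String) : Decidable (Spec_resolve_skill_prompts skill_ids out) := by unfold Spec_resolve_skill_prompts; infer_instance

-- ===== CLAIM (what is proved, stated in full; the proofs are below) =====
def Claim_equal_resolve_skill_prompts : Prop := ∀ (skill_ids : List String), Dom_resolve_skill_prompts skill_ids → Spec_resolve_skill_prompts skill_ids (resolve_skill_prompts skill_ids)

-- ===== LEMMAS AND PROOFS =====

-- reference recursion: the library ids A keeps (first occurrences not yet seen), in A's order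
def pvDedupF (seen : List String) : List String → List String
  | [] => []
  | n :: rest =>
    if pvSkillLibrary.contains n ∧ n ∉ seen then n :: pvDedupF (seen ++ [n]) rest
    else pvDedupF seen rest

lemma pvLib_not_contains_empty : pvSkillLibrary.contains "" = false := by decide

lemma pvLib_contains_iff_mem_keys (y : String) :
    pvSkillLibrary.contains y = true ↔ y ∈ pvSkillLibrary.keys := by
  simp [pvSkillLibrary, pysem]

-- A's fold emits exactly the prompts of pvDedupF's ids
lemma pvA_go (l : List String) : ∀ (acc : List String) (seen : PySem.Set String),
    (l.foldl pvStepA ((acc, seen) : List String × PySem.Set String)).1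
    = acc ++ (pvDedupF seen (l.map pvNorm)).map (fun n => pvSkillLibrary.getD n "") := by
  induction l with
  | nil => intro acc seen; simp [pvDedupF]
  | cons a l ih =>
    intro acc seen
    simp only [List.foldl_cons, List.map_cons]
    set n := pvNorm a with hn
    by_cases h1 : n = "" ∨ n ∈ seen
    · have hcond : ¬ (pvSkillLibrary.contains n = true ∧ n ∉ seen) := by
        rcases h1 with h | h
        · intro hc; rw [h] at hc; rw [pvLib_not_contains_empty] at hc; exact Bool.false_ne_true hc.1
        · intro hc; exact hc.2 h
      rw [pvDedupF, if_neg hcond, show pvStepA (acc, seen) a = (acc, seen) by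
        simp only [pvStepA]; rw [← hn, if_pos h1]]
      exact ih acc seen
    · have hne : n ≠ "" := fun h => h1 (Or.inl h)
      have hnm : n ∉ seen := fun h => h1 (Or.inr h)
      by_cases h2 : pvSkillLibrary.contains n = true
      · rw [pvDedupF, if_pos ⟨h2, hnm⟩, show pvStepA (acc, seen) a
            = (acc ++ [pvSkillLibrary.getD n ""], seen ++ [n]) by
          simp only [pvStepA]; rw [← hn, if_neg h1, if_pos h2, PySem.Set.add_of_not_mem hnm]]
        rw [ih (acc ++ [pvSkillLibrary.getD n ""]) (seen ++ [n])]
        simp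
      · have hcond : ¬ (pvSkillLibrary.contains n = true ∧ n ∉ seen) := fun hc => h2 hc.1
        rw [pvDedupF, if_neg hcond, show pvStepA (acc, seen) a = (acc, seen) by
          simp only [pvStepA]; rw [← hn, if_neg h1, if_neg h2]]
        exact ih acc seen

lemma pvDedupF_mem (l : List String) : ∀ (seen : List String) (x : String),
    x ∈ pvDedupF seen l ↔ pvSkillLibrary.contains x = true ∧ x ∈ l ∧ x ∉ seen := by
  induction l with
  | nil => intro seen x; simp [pvDedupF]
  | cons a l ih =>
    intro seen x
    by_cases h : pvSkillLibrary.contains a = true ∧ a ∉ seen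
    · rw [pvDedupF, if_pos h]
      constructor
      · intro hx0
        rcases List.mem_cons.1 hx0 with rfl | hx
        · exact ⟨h.1, List.mem_cons_self, h.2⟩
        · rcases (ih _ x).1 hx with ⟨hc, hm, hs⟩
          exact ⟨hc, List.mem_cons_of_mem _ hm, fun hxs => hs (List.mem_append_left _ hxs)⟩
      · rintro ⟨hc, hm, hs⟩
        rcases List.mem_cons.1 hm with rfl | hm
        · exact List.mem_cons_self
        · by_cases hxa : x = a
          · exact hxa ▸ List.mem_cons_self
          · exact List.mem_cons_of_mem _ ((ih _ x).2 ⟨hc, hm, by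
              simp [List.mem_append, hs, hxa]⟩)
    · rw [pvDedupF, if_neg h]
      rw [ih]
      constructor
      · rintro ⟨hc, hm, hs⟩; exact ⟨hc, List.mem_cons_of_mem _ hm, hs⟩
      · rintro ⟨hc, hm, hs⟩
        rcases List.mem_cons.1 hm with rfl | hm
        · exact absurd ⟨hc, hs⟩ h
        · exact ⟨hc, hm, hs⟩

lemma pvDedupF_nodup (l : List String) : ∀ (seen : List String), (pvDedupF seen l).Nodup := by
  induction l with
  | nil => intro seen; simp [pvDedupF]
  | cons a l ih =>
    intro seen
    by_cases h : pvSkillLibrary.contains a = true ∧ a ∉ seen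
    · rw [pvDedupF, if_pos h]
      refine List.nodup_cons.2 ⟨fun hmem => ?_, ih _⟩
      exact ((pvDedupF_mem l _ a).1 hmem).2.2 (List.mem_append_right _ List.mem_cons_self)
    · rw [pvDedupF, if_neg h]; exact ih _

-- pvDedupF lists ids in strictly increasing order of first occurrence
lemma pvDedupF_pairwise (l : List String) : ∀ (seen pre : List String),
    (∀ x ∈ pre, pvSkillLibrary.contains x = true → x ∈ seen) →
    (pvDedupF seen l).Pairwise (fun a b => (pre ++ l).idxOf a < (pre ++ l).idxOf b) := by
  induction l with
  | nil => intro seen pre _; simp [pvDedupF]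
  | cons a l ih =>
    intro seen pre hpre
    by_cases h : pvSkillLibrary.contains a = true ∧ a ∉ seen
    · rw [pvDedupF, if_pos h]
      have hanp : a ∉ pre := fun hap => h.2 (hpre a hap h.1)
      refine List.pairwise_cons.2 ⟨fun y hy => ?_, ?_⟩
      · rcases (pvDedupF_mem l _ y).1 hy with ⟨_, hyl, hys⟩
        have hya : y ≠ a := fun hya => hys (hya ▸ List.mem_append_right _ List.mem_cons_self)
        have hynp : y ∉ pre := fun hyp => hys (List.mem_append_left _ (hpre y hyp ‹_›))
        rw [List.idxOf_append_of_notMem hanp, List.idxOf_append_of_notMem hynp]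
        have h1 : (a :: l).idxOf a = 0 := by simp
        have h2 : (a :: l).idxOf y = l.idxOf y + 1 := List.idxOf_cons_ne _ (fun e => hya e.symm)
        omega
      · have := ih (seen ++ [a]) (pre ++ [a]) (by
          intro x hx hcx
          rcases List.mem_append.1 hx with hx | hx
          · exact List.mem_append_left _ (hpre x hx hcx)
          · exact List.mem_append_right _ hx)
        simpa [List.append_assoc] using this
    · rw [pvDedupF, if_neg h]
      have := ih seen (pre ++ [a]) (by
        intro x hx hcx
        rcases List.mem_append.1 hx with hx | hx
        · exact hpre x hx hcx
        · rcases List.mem_singleton.1 hx with rfl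
          rcases not_and_or.1 h with hc | hs
          · exact absurd hcx hc
          · exact not_not.1 hs)
      simpa [List.append_assoc] using this

lemma pvIndexGetD_eq_idxOf (l : List String) (a : String) (h : a ∈ l) :
    (PySem.List.index? l a).getD 0 = l.idxOf a := by
  rcases Option.isSome_iff_exists.1 ((PySem.List.index?_isSome_iff l a).2 h) with ⟨i, hi⟩
  rw [hi, Option.getD_some]
  rw [PySem.List.index?_eq_idxOf?] at hi
  rw [List.idxOf_eq_getD_idxOf?, hi, Option.getD_some]

lemma pvMain (norm : List String) :
    (pvDedupF [] norm).map (fun n => pvSkillLibrary.getD n "")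
    = (PySem.List.sorted
        ((pvSkillLibrary.keys.filter (fun k => decide (k ∈ norm))).map
          (fun k => ((PySem.List.index? norm k).getD 0, k)))
        (fun p => p.1) false).map (fun p => pvSkillLibrary.getD p.2 "") := by
  have hmemD : ∀ x, x ∈ pvDedupF [] norm ↔ pvSkillLibrary.contains x = true ∧ x ∈ norm := by
    intro x; rw [pvDedupF_mem]; simp
  have hperm : ((pvDedupF [] norm).map (fun k => ((PySem.List.index? norm k).getD 0, k))).Perm
      ((pvSkillLibrary.keys.filter (fun k => decide (k ∈ norm))).map
        (fun k => ((PySem.List.index? norm k).getD 0, k))) := by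
    refine List.Perm.map _ ?_
    refine (List.perm_ext_iff_of_nodup (pvDedupF_nodup norm _)
      ((by decide : pvSkillLibrary.keys.Nodup).filter _)).2 ?_
    intro a
    rw [hmemD, List.mem_filter, ← pvLib_contains_iff_mem_keys]
    simp [and_comm]
  have hpairD : (pvDedupF [] norm).Pairwise (fun a b => norm.idxOf a < norm.idxOf b) := by
    have := pvDedupF_pairwise norm ([] : List String) ([] : List String) (by simp)
    simpa using this
  have hpair : ((pvDedupF [] norm).map (fun k => ((PySem.List.index? norm k).getD 0, k))).Pairwise
      (fun a b => (fun p : Nat × String => p.1) a < (fun p : Nat × String => p.1) b) := by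
    rw [List.pairwise_map]
    refine hpairD.imp_of_mem ?_
    intro a b ha hb hlt
    rw [pvIndexGetD_eq_idxOf norm a ((hmemD a).1 ha).2,
        pvIndexGetD_eq_idxOf norm b ((hmemD b).1 hb).2]
    exact hlt
  rw [PySem.List.sorted_eq_of_perm_of_pairwise_lt _ _ _ hperm hpair]
  simp [List.map_map, Function.comp]

-- ===== VERDICT (by name: the statement is the Claim_ definition above) =====
theorem resolve_skill_prompts_spec : Claim_equal_resolve_skill_prompts := by
  intro skill_ids _
  unfold Spec_resolve_skill_prompts
  have hA : resolve_skill_prompts skill_ids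
      = (pvDedupF [] (skill_ids.map pvNorm)).map (fun n => pvSkillLibrary.getD n "") := by
    unfold resolve_skill_prompts
    rw [pvA_go skill_ids [] PySem.Set.empty]
    rfl
  have hB : resolve_skill_prompts_alt skill_ids
      = (PySem.List.sorted
          ((pvSkillLibrary.keys.filter (fun k => decide (k ∈ skill_ids.map pvNorm))).map
            (fun k => ((PySem.List.index? (skill_ids.map pvNorm) k).getD 0, k)))
          (fun p => p.1) false).map (fun p => pvSkillLibrary.getD p.2 "") := by
    simp only [resolve_skill_prompts_alt]
  rw [hA, hB, pvMain]
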